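-- pv_equiv track=rewrite | github.com/chips-wq/everybody-codes | event2024/day16/part3.py | F
-- ===== SOURCE A (Python) =====
-- from collections import Counter
--
-- def F(T, lines):
--     lines = [list(line) for line in lines]
--     # rotate lines[0] by T[0]
--     # rotate lines[1] by T[1]
--     def reverse(start: int, ll: int, line: list[int]):
--         l, r = start, start + ll - 1
--         while l < r:
--             line[l], line[r] = line[r], line[l]
--             l += 1
--             r -= 1
--
--     for line, am in zip(lines, T):
--         n = len(line)
--         assert 0 <= am < n
--
--         reverse(0, n, line)
--         reverse(0, n-am, line)
--         reverse(n-am, am, line)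
--
--     # In this current particular state, how many coins do we win ?
--     # Do I need to add line[0][1] ?
--     S = "".join(line[0][0] + line[0][2] for line in lines)
--     C = Counter(S)
--     won = sum(max(0, V-2) for V in C.values())
--     return won
-- ===== SOURCE B (Python) =====
-- from collections import Counter
--
-- def F(T, lines):
--     # A left-rotation by am brings element am of a line to the front, so the
--     # visible element of line i is line[am] where am is its rotation amount
--     # (0 for a line given no amount).  Count the first and third character of
--     # every visible element; each character seen more than twice wins its
--     # count minus two coins.
--     cnt = Counter()
--     for i, line in enumerate(lines):
--         am = T[i] if i < len(T) else 0
--         assert 0 <= am < len(line)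
--         e = line[am]
--         cnt[e[0]] += 1
--         cnt[e[2]] += 1
--     return sum(c - 2 for c in cnt.values() if c > 2)
-- ===== Notes on version B (the rewrite author's own statement) =====
-- stated objective: simpler
-- what changed: B drops A's three-reversal in-place rotation of every line and the joined intermediate string: the visible element of line i after rotation is line[T[i]] (line[0] when no amount is given), so B reads it directly and counts the two characters per line into a Counter in one uniform pass.
import Mathlib
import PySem

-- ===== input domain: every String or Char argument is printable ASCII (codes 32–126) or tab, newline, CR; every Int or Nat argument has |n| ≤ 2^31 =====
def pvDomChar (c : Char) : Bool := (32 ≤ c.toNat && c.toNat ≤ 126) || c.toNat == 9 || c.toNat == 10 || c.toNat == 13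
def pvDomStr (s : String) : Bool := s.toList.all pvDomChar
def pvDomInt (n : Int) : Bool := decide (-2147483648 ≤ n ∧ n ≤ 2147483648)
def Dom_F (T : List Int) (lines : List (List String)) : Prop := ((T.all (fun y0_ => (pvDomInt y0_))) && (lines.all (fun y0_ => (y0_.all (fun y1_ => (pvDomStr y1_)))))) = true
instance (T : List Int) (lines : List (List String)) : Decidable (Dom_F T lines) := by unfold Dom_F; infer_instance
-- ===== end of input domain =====

-- B skips A's three-reversal rotation and joined string: the visible element of line i is
-- line[T[i]] (line[0] without an amount), counted directly in one pass (objective: simpler).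

-- ===== PORT A =====
-- the inner while-loop of A's `reverse`: swap line[l],line[r] while l < r
-- (indices are in range on every input Pre_F admits; getD "" stands for the list read)
def pyRevLoop (l r : Nat) (line : List String) : List String :=
  if l < r then
    pyRevLoop (l + 1) (r - 1) ((line.set l (line.getD r "")).set r (line.getD l ""))
  else line
termination_by r - l

-- A's `reverse(start, ll, line)`: l = start, r = start + ll - 1
def pyRevSeg (start ll : Nat) (line : List String) : List String :=
  pyRevLoop start (start + ll - 1) line

-- the three reverse calls of A's for-loop body (am ≥ 0 under Pre_F, so .toNat is exact there)
def rotLine (line : List String) (am : Int) : List String :=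
  let n := line.length
  let a := am.toNat
  let l1 := pyRevSeg 0 n line
  let l2 := pyRevSeg 0 (n - a) l1
  pyRevSeg (n - a) a l2

-- line[0][0] + line[0][2] as the two characters contributed to S (reads are in range under Pre_F)
def pairOf (line : List String) : List Char :=
  let e := line.getD 0 ""
  [e.toList.getD 0 ' ', e.toList.getD 2 ' ']

def F (T : List Int) (lines : List (List String)) : Int :=
  -- the for-loop over zip(lines, T) rotates exactly the first min-length prefix in place
  let lines2 := (List.zipWith (fun line am => rotLine line am) lines T) ++ lines.drop T.length
  let S : List Char := lines2.flatMap pairOf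
  let C := PySem.Dict.counter S
  (C.values.map (fun v => max 0 (v - 2))).sum

-- ===== PORT B =====
-- cnt[e[0]] += 1; cnt[e[2]] += 1
def bump (d : PySem.Dict Char Int) (e : String) : PySem.Dict Char Int :=
  (d.modify (e.toList.getD 0 ' ') 0 (· + 1)).modify (e.toList.getD 2 ' ') 0 (· + 1)

def F_alt (T : List Int) (lines : List (List String)) : Int :=
  -- for i, line in enumerate(lines): am = T[i] if i < len(T) else 0; bump line[am]
  let d := (PySem.List.enumerate lines 0).foldl
    (fun d p =>
      let am : Int := if p.1 < (T.length : Int) then T.getD p.1.toNat 0 else 0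
      bump d (p.2.getD am.toNat "")) PySem.Dict.empty
  ((d.values.filter (fun c => decide (2 < c))).map (fun c => c - 2)).sum

-- ===== PRECONDITION & SPEC =====
-- Pre_F excludes exactly the inputs where the Python A raises: a failing `assert 0 <= am < len(line)`
-- (AssertionError) on a zipped pair, or an IndexError from line[0] / line[0][2] when a chosen
-- element list is empty or its chosen string is shorter than 3 characters.
def Pre_F (T : List Int) (lines : List (List String)) : Prop :=
  (∀ p ∈ lines.zip T, 0 ≤ p.2 ∧ p.2 < (p.1.length : Int) ∧ 3 ≤ (p.1.getD p.2.toNat "").toList.length) ∧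
  (∀ line ∈ lines.drop T.length, line ≠ [] ∧ 3 ≤ (line.getD 0 "").toList.length)

instance (T : List Int) (lines : List (List String)) : Decidable (Pre_F T lines) := by
  unfold Pre_F; infer_instance

def pvWitness_F : List Int × List (List String) := ([1], [["abc", "xyz"], ["qrs"]])

def Spec_F (T : List Int) (lines : List (List String)) (out : Int) : Prop := out = F_alt T lines
instance (T : List Int) (lines : List (List String)) (out : Int) : Decidable (Spec_F T lines out) := by unfold Spec_F; infer_instance

-- ===== CLAIM (what is proved, stated in full; the proofs are below) =====
def Claim_equal_F : Prop := ∀ (T : List Int) (lines : List (List String)), Dom_F T lines → Pre_F T lines → Spec_F T lines (F T lines)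

-- ===== LEMMAS AND PROOFS =====

theorem swap_getD (line : List String) (l r : Nat) (hl : l < line.length)
    (hr : r < line.length) (j : Nat) :
    ((line.set l (line.getD r "")).set r (line.getD l "")).getD j "" =
      if j = r then line.getD l "" else if j = l then line.getD r "" else line.getD j "" := by
  simp only [List.getD_eq_getElem?_getD, List.getElem?_set, List.length_set]
  by_cases hjr : j = r
  · subst hjr
    simp [hr, hl]
  · by_cases hjl : j = l
    · subst hjl
      simp [Ne.symm hjr, hjr, hr, hl]
    · simp [hjr, hjl, Ne.symm hjr, Ne.symm hjl]

theorem pyRevLoop_length (l r : Nat) (line : List String) :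
    (pyRevLoop l r line).length = line.length := by
  fun_induction pyRevLoop l r line with
  | case1 l r line h ih => simpa using ih
  | case2 => rfl

theorem pyRevLoop_getD (l r : Nat) (line : List String) (hr : r < line.length) (k : Nat) :
    (pyRevLoop l r line).getD k "" =
      if l ≤ k ∧ k ≤ r then line.getD (l + r - k) "" else line.getD k "" := by
  fun_induction pyRevLoop l r line with
  | case1 l r line h ih =>
    have hl : l < line.length := lt_trans h hr
    rw [ih (by simpa using by omega)]
    by_cases hk : l ≤ k ∧ k ≤ r
    · by_cases hk1 : l + 1 ≤ k ∧ k ≤ r - 1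
      · rw [if_pos hk1, swap_getD line l r hl hr, if_pos hk]
        have he : l + 1 + (r - 1) - k = l + r - k := by omega
        rw [he, if_neg (by omega), if_neg (by omega)]
      · rw [if_neg hk1, if_pos hk, swap_getD line l r hl hr]
        rcases (by omega : k = l ∨ k = r) with hkl | hkr
        · rw [if_neg (by omega), if_pos hkl, (by omega : l + r - k = r)]
        · rw [if_pos hkr, (by omega : l + r - k = l)]
    · have hk1 : ¬ (l + 1 ≤ k ∧ k ≤ r - 1) := by omega
      rw [if_neg hk1, if_neg hk, swap_getD line l r hl hr,
        if_neg (by omega), if_neg (by omega)]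
  | case2 l r line h =>
    rcases (by omega : ¬ (l ≤ k ∧ k ≤ r) ∨ (l = k ∧ k = r)) with h' | ⟨h1, h2⟩
    · rw [if_neg h']
    · rw [if_pos (by omega), (by omega : l + r - k = k)]

theorem rotLine_head (line : List String) (am : Int)
    (h0 : 0 ≤ am) (h1 : am < (line.length : Int)) :
    (rotLine line am).getD 0 "" = line.getD am.toNat "" := by
  unfold rotLine pyRevSeg
  set n := line.length with hn
  set a := am.toNat with ha
  have han : a < n := by omega
  have hL1 : (pyRevLoop 0 (0 + n - 1) line).length = n := pyRevLoop_length _ _ _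
  have hL2 : (pyRevLoop 0 (0 + (n - a) - 1) (pyRevLoop 0 (0 + n - 1) line)).length = n := by
    rw [pyRevLoop_length, hL1]
  rw [pyRevLoop_getD _ _ _ (by omega)]
  rw [if_neg (by omega : ¬ ((n - a) ≤ 0 ∧ (0:Nat) ≤ n - a + a - 1))]
  rw [pyRevLoop_getD _ _ _ (by omega)]
  rw [if_pos (by constructor <;> omega)]
  rw [pyRevLoop_getD _ _ _ (by omega)]
  rw [if_pos (by constructor <;> omega)]
  congr 1
  omega

-- B's bump-fold over any list of chosen strings is the counter-fold over the flattened char pairs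
theorem foldl_bump_map {α : Type} (f : α → String) (xs : List α) (d : PySem.Dict Char Int) :
    xs.foldl (fun d x => bump d (f x)) d =
      ((xs.map f).flatMap (fun e => [e.toList.getD 0 ' ', e.toList.getD 2 ' '])).foldl
        (fun d c => d.modify c 0 (· + 1)) d := by
  induction xs generalizing d with
  | nil => rfl
  | cons x xs ih =>
    simp only [List.foldl_cons, List.map_cons, List.flatMap_cons, List.cons_append,
      List.nil_append]
    exact ih (bump d (f x))

-- the final sum: max(0, v-2) over all values = (v-2) over the values exceeding 2
theorem sum_max_eq_filter (l : List Int) :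
    (l.map (fun v => max 0 (v - 2))).sum =
      ((l.filter (fun c => decide (2 < c))).map (fun c => c - 2)).sum := by
  induction l with
  | nil => rfl
  | cons v l ih =>
    simp only [List.map_cons, List.sum_cons, List.filter_cons, decide_eq_true_eq]
    by_cases h : 2 < v
    · rw [if_pos h, List.map_cons, List.sum_cons, ih]
      omega
    · rw [if_neg h, ih]
      omega

-- shifting the start of enumerate shifts every index
theorem enumerate_shift {α : Type} (xs : List α) (s : Int) :
    PySem.List.enumerate xs (s + 1) =
      (PySem.List.enumerate xs s).map (fun p => (p.1 + 1, p.2)) := by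
  induction xs generalizing s with
  | nil => simp [PySem.List.enumerate_nil]
  | cons x xs ih => simp [PySem.List.enumerate_cons, ih]

-- B's chosen strings, in order: the zipped prefix reads line[T[i]], the rest read line[0]
theorem map_chosen (lines : List (List String)) (T : List Int) :
    (PySem.List.enumerate lines 0).map
        (fun p => p.2.getD (if p.1 < (T.length : Int) then T.getD p.1.toNat 0 else 0).toNat "") =
      (lines.zip T).map (fun p => p.1.getD p.2.toNat "")
        ++ (lines.drop T.length).map (fun line => line.getD 0 "") := by
  induction lines generalizing T with
  | nil => simp [PySem.List.enumerate_nil]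
  | cons line lines ih =>
    rw [PySem.List.enumerate_cons, (by norm_num : (0:Int) + 1 = 0 + 1), enumerate_shift]
    simp only [List.map_cons, List.map_map]
    cases T with
    | nil =>
      have hih := ih []
      simp only [List.length_nil, List.zip_nil_right, List.map_nil, List.drop_zero,
        List.nil_append] at hih ⊢
      rw [List.map_cons, ← hih]
      refine congrArg₂ List.cons ?_ (List.map_congr_left ?_)
      · norm_num
      · intro p hp
        simp only [Function.comp_apply]
        split_ifs <;> simp [List.getD]
    | cons am T =>
      simp only [List.zip_cons_cons, List.map_cons, List.drop_succ_cons, List.cons_append,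
        List.length_cons]
      rw [← ih T]
      refine congrArg₂ List.cons ?_ (List.map_congr_left ?_)
      · have h0 : ((0:Int) < ((T.length + 1 : Nat) : Int)) := by push_cast; omega
        rw [if_pos h0]
        norm_num
      · intro p hp
        obtain ⟨k, hk, hpk⟩ := (PySem.List.mem_enumerate_iff _ _ _).1 hp
        subst hpk
        simp only [Function.comp_apply, zero_add]
        have h1 : ((k:Int) + 1 < ((T.length + 1 : Nat) : Int)) ↔ ((k:Int) < (T.length : Int)) := by
          push_cast; omega
        by_cases hc : (k:Int) < (T.length : Int)
        · rw [if_pos (h1.2 hc), if_pos hc]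
          have h2 : ((k:Int) + 1).toNat = (k:Int).toNat + 1 := by omega
          rw [h2]
          simp
        · rw [if_neg (fun h => hc (h1.1 h)), if_neg hc]

theorem zipWith_rot_flatMap (lines : List (List String)) (T : List Int)
    (h : ∀ p ∈ lines.zip T, 0 ≤ p.2 ∧ p.2 < (p.1.length : Int) ∧
          3 ≤ (p.1.getD p.2.toNat "").toList.length) :
    (List.zipWith (fun line am => rotLine line am) lines T).flatMap pairOf =
      (lines.zip T).flatMap (fun p =>
        let e := p.1.getD p.2.toNat ""
        [e.toList.getD 0 ' ', e.toList.getD 2 ' ']) := by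
  induction lines generalizing T with
  | nil => simp
  | cons line lines ih =>
    cases T with
    | nil => simp
    | cons am T =>
      have hp := h (line, am) (by simp [List.zip_cons_cons])
      simp only [List.zipWith_cons_cons, List.zip_cons_cons, List.flatMap_cons]
      rw [ih _ (fun p hp' => h p (by simp [List.zip_cons_cons, hp']))]
      congr 1
      simp only [pairOf]
      rw [rotLine_head line am hp.1 hp.2.1]

theorem F_eq_F_alt (T : List Int) (lines : List (List String)) (hpre : Pre_F T lines) :
    F T lines = F_alt T lines := by
  obtain ⟨h1, h2⟩ := hpre
  have hbody : pairOf = (fun line : List String =>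
      (fun e : String => [e.toList.getD 0 ' ', e.toList.getD 2 ' ']) (line.getD 0 "")) := rfl
  have estep : F_alt T lines =
      (((PySem.Dict.counter
          (((lines.zip T).map (fun p => p.1.getD p.2.toNat "")
            ++ (lines.drop T.length).map (fun line => line.getD 0 "")).flatMap
              (fun e => [e.toList.getD 0 ' ', e.toList.getD 2 ' ']))).values.filter
                (fun c => decide (2 < c))).map (fun c => c - 2)).sum := by
    show ((((PySem.List.enumerate lines 0).foldl
        (fun d p => bump d (p.2.getD
          (if p.1 < (T.length : Int) then T.getD p.1.toNat 0 else 0).toNat ""))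
          PySem.Dict.empty).values.filter (fun c => decide (2 < c))).map (fun c => c - 2)).sum = _
    rw [foldl_bump_map
        (fun p : Int × List String =>
          p.2.getD (if p.1 < (T.length : Int) then T.getD p.1.toNat 0 else 0).toNat ""),
        map_chosen, PySem.Dict.counter_eq_foldl]
  have astep : F T lines =
      ((PySem.Dict.counter
          (((lines.zip T).map (fun p => p.1.getD p.2.toNat "")
            ++ (lines.drop T.length).map (fun line => line.getD 0 "")).flatMap
              (fun e => [e.toList.getD 0 ' ', e.toList.getD 2 ' ']))).values.map
                (fun v => max 0 (v - 2))).sum := by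
    show ((PySem.Dict.counter
        (((List.zipWith (fun line am => rotLine line am) lines T)
          ++ lines.drop T.length).flatMap pairOf)).values.map (fun v => max 0 (v - 2))).sum = _
    rw [List.flatMap_append, zipWith_rot_flatMap lines T h1, List.flatMap_append,
        List.flatMap_map, List.flatMap_map, hbody]
  rw [astep, estep, sum_max_eq_filter]

-- ===== VERDICT (by name: the statement is the Claim_ definition above) =====
theorem F_spec : Claim_equal_F := by
  intro T lines _ hpre
  unfold Spec_F
  exact F_eq_F_alt T lines hpre
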